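-- pv_equiv track=rewrite | github.com/patrickoleary/vtk-rag | vtk_rag/chunking/doc_chunker.py | _group_standalone_methods
-- ===== SOURCE A (Python) =====
-- from collections import defaultdict
--
-- def _group_standalone_methods(methods: dict[str, str]) -> dict[str, dict[str, str]]:
--     """Group standalone methods by category."""
--     groups = defaultdict(dict)
--     used = set()
--
--     # Group Add/Remove pairs
--     for name in methods:
--         if name.startswith('Add') and len(name) > 3:
--             thing = name[3:]
--             related = {}
--             for prefix in ['Add', 'Remove', 'RemoveAll', 'GetNumberOf', 'Get']:
--                 for suffix in [thing, thing + 's', thing.rstrip('s')]: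
--                     key = f'{prefix}{suffix}'
--                     if key in methods and key not in used:
--                         related[key] = methods[key]
--                         used.add(key)
--             if related:
--                 groups[f'{thing}_collection'] = related
--
--     # Group coordinate transforms
--     coord_methods = {}
--     for name in methods:
--         if name not in used and any(x in name for x in ['ToWorld', 'ToView', 'ToPose', 'ToDisplay']):
--             coord_methods[name] = methods[name]
--             used.add(name)
--     if coord_methods:
--         groups['coordinate_transforms'] = coord_methods
--
--     # Group render methods
--     render_methods = {}
--     for name in methods:
--         if name not in used and 'Render' in name:
--             render_methods[name] = methods[name]
--             used.add(name)
--     if render_methods: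
--         groups['rendering'] = render_methods
--
--     # Remaining methods go into individual chunks or small groups
--     remaining = {n: d for n, d in methods.items() if n not in used}
--
--     # Group remaining by first verb/prefix
--     prefix_groups = defaultdict(dict)
--     for name, doc in remaining.items():
--         # Extract prefix (Get, Has, Is, Create, Make, etc.)
--         prefix = None
--         for p in ['Get', 'Has', 'Is', 'Create', 'Make', 'Compute', 'Release', 'Capture']:
--             if name.startswith(p):
--                 prefix = p
--                 break
--
--         if prefix:
--             prefix_groups[f'{prefix.lower()}_methods'][name] = doc
--         else:
--             # Individual action methods
--             prefix_groups[f'{name}_method'][name] = doc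
--
--     groups.update(prefix_groups)
--
--     return dict(groups)
-- ===== SOURCE B (Python) =====
-- def _collect_pairs(methods):
--     """Add/Remove-collection phase: returns (collection groups, used names)."""
--     groups = {}
--     used = set()
--     for name in methods:
--         if name.startswith('Add') and len(name) > 3:
--             thing = name[3:]
--             related = {}
--             keys = [p + s for p in ['Add', 'Remove', 'RemoveAll', 'GetNumberOf', 'Get']
--                     for s in [thing, thing + 's', thing.rstrip('s')]]
--             for key in keys:
--                 if key in methods and key not in used:
--                     related[key] = methods[key]
--                     used.add(key)
--             if related:
--                 groups[thing + '_collection'] = related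
--     return groups, used
--
--
-- def _group_standalone_methods(methods: dict[str, str]) -> dict[str, dict[str, str]]:
--     """Group standalone methods by category (single classification pass)."""
--     groups, used = _collect_pairs(methods)
--
--     coord_methods = {}
--     render_methods = {}
--     prefix_groups = {}
--     for name, doc in methods.items():
--         if name in used:
--             continue
--         if any(x in name for x in ('ToWorld', 'ToView', 'ToPose', 'ToDisplay')):
--             coord_methods[name] = doc
--         elif 'Render' in name:
--             render_methods[name] = doc
--         else:
--             for p in ('Get', 'Has', 'Is', 'Create', 'Make', 'Compute', 'Release', 'Capture'):
--                 if name.startswith(p):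
--                     key = p.lower() + '_methods'
--                     break
--             else:
--                 key = name + '_method'
--             prefix_groups.setdefault(key, {})[name] = doc
--
--     if coord_methods:
--         groups['coordinate_transforms'] = coord_methods
--     if render_methods:
--         groups['rendering'] = render_methods
--     groups.update(prefix_groups)
--     return groups
-- ===== Notes on version B (the rewrite author's own statement) =====
-- stated objective: alternative
-- what changed: A's three separate scans over methods (coordinate transforms, render methods, then a remaining-dict rebuild plus prefix grouping) are replaced by one classification pass with an elif chain that accumulates the coordinate, render and prefix groups simultaneously, with the Add/Remove-collection phase factored into a helper; the intermediate `remaining` dict and the used-set bookkeeping of the later passes disappear.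
import Mathlib
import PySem

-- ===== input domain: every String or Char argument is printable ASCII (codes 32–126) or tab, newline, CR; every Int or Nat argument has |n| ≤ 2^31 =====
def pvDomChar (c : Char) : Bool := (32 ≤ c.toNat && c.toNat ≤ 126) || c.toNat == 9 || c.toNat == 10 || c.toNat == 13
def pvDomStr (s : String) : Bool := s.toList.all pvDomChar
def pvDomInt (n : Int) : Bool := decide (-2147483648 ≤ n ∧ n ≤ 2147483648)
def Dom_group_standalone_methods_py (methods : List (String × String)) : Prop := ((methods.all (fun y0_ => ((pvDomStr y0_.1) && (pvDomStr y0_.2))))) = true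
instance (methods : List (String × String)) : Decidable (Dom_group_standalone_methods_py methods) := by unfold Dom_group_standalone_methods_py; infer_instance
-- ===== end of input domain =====

-- B merges A's three classification scans (coordinate / render / prefix) into one pass with an
-- elif chain; objective: alternative decomposition (same asymptotic cost).

-- ===== PORT A =====
-- module-level string literals shared by the phases
def pvPairPrefixes : List String := ["Add", "Remove", "RemoveAll", "GetNumberOf", "Get"]
def pvCoordNeedles : List String := ["ToWorld", "ToView", "ToPose", "ToDisplay"]
def pvVerbPrefixes : List String := ["Get", "Has", "Is", "Create", "Make", "Compute", "Release", "Capture"]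

-- hand port of thing.rstrip('s') (PySem's rstrip strips whitespace, not a chosen character);
-- exact: Python drops exactly the trailing run of 's' characters
def pvRstripS (s : String) : String :=
  String.ofList ((s.toList.reverse.dropWhile (fun c => c == 's')).reverse)

-- any(x in name for x in ['ToWorld', 'ToView', 'ToPose', 'ToDisplay'])
def pvCoordP (n : String) : Bool := pvCoordNeedles.any (fun x => PySem.Str.isIn x n)
-- 'Render' in name
def pvRenderP (n : String) : Bool := PySem.Str.isIn "Render" n

-- suffix-loop body: key = f'{prefix}{suffix}';
-- if key in methods and key not in used: related[key] = methods[key]; used.add(key)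
def pvA_pairStep (M : PySem.Dict String String)
    (st : PySem.Dict String String × PySem.Set String) (key : String) :
    PySem.Dict String String × PySem.Set String :=
  if M.contains key && !st.2.contains key then
    (st.1.insert key (M.getD key ""), st.2.add key)
  else st

-- `# Group Add/Remove pairs` loop of A (nested prefix/suffix loops, in A's order)
def pvA_phase1 (methods : List (String × String)) :
    PySem.Dict String (PySem.Dict String String) × PySem.Set String :=
  let M : PySem.Dict String String := PySem.Dict.mk methods
  methods.foldl (fun st nd =>
    let name := nd.1
    if PySem.Str.startswith name "Add" && decide (PySem.Str.len name > 3) then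
      let thing := PySem.Str.slice name (some 3) none
      let rel := pvPairPrefixes.foldl (fun st2 pre =>
        [thing, thing ++ "s", pvRstripS thing].foldl (fun st3 suf =>
          pvA_pairStep M st3 (pre ++ suf)) st2) (PySem.Dict.mk [], st.2)
      if rel.1.items = [] then (st.1, rel.2)
      else (st.1.insert (thing ++ "_collection") rel.1, rel.2)
    else st) (PySem.Dict.mk [], PySem.Set.ofList [])

-- `# Group coordinate transforms` loop of A (marks names used as it selects)
def pvA_coord (methods : List (String × String)) (u : PySem.Set String) :
    PySem.Dict String String × PySem.Set String :=
  methods.foldl (fun st nd =>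
    if !st.2.contains nd.1 && pvCoordP nd.1 then
      (st.1.insert nd.1 ((PySem.Dict.mk methods).getD nd.1 ""), st.2.add nd.1)
    else st) (PySem.Dict.mk [], u)

-- `# Group render methods` loop of A
def pvA_render (methods : List (String × String)) (u : PySem.Set String) :
    PySem.Dict String String × PySem.Set String :=
  methods.foldl (fun st nd =>
    if !st.2.contains nd.1 && pvRenderP nd.1 then
      (st.1.insert nd.1 ((PySem.Dict.mk methods).getD nd.1 ""), st.2.add nd.1)
    else st) (PySem.Dict.mk [], u)

-- prefix-extraction loop with break: first p with name.startswith(p), else None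
def pvVerbKey (name : String) : String :=
  match pvVerbPrefixes.find? (fun p => PySem.Str.startswith name p) with
  | some p => PySem.Str.lower p ++ "_methods"
  | none => name ++ "_method"

-- prefix_groups[key][name] = doc on a defaultdict(dict)
def pvPgStep (pg : PySem.Dict String (PySem.Dict String String)) (nd : String × String) :
    PySem.Dict String (PySem.Dict String String) :=
  pg.insert (pvVerbKey nd.1) ((pg.getD (pvVerbKey nd.1) (PySem.Dict.mk [])).insert nd.1 nd.2)

def group_standalone_methods_py (methods : List (String × String)) :
    List (String × List (String × String)) :=
  -- groups = defaultdict(dict); used = set(); Add/Remove pairs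
  let p1 := pvA_phase1 methods
  -- coordinate transforms
  let p2 := pvA_coord methods p1.2
  let groups2 := if p2.1.items = [] then p1.1 else p1.1.insert "coordinate_transforms" p2.1
  -- render methods
  let p3 := pvA_render methods p2.2
  let groups3 := if p3.1.items = [] then groups2 else groups2.insert "rendering" p3.1
  -- remaining = {n: d for n, d in methods.items() if n not in used}
  let remaining := methods.foldl (fun d nd =>
    if !p3.2.contains nd.1 then d.insert nd.1 nd.2 else d)
    (PySem.Dict.mk [] : PySem.Dict String String)
  -- group remaining by first verb/prefix
  let pg := remaining.items.foldl pvPgStep (PySem.Dict.mk [])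
  -- groups.update(prefix_groups); return dict(groups)
  let groupsF := pg.items.foldl (fun g kv => g.insert kv.1 kv.2) groups3
  groupsF.items.map (fun kv => (kv.1, kv.2.items))

-- ===== PORT B =====
-- Source B _collect_pairs: the Add/Remove phase, key list built as one comprehension
def pvCollectPairs (methods : List (String × String)) :
    PySem.Dict String (PySem.Dict String String) × PySem.Set String :=
  let M : PySem.Dict String String := PySem.Dict.mk methods
  methods.foldl (fun st nd =>
    let name := nd.1
    if PySem.Str.startswith name "Add" && decide (PySem.Str.len name > 3) then
      let thing := PySem.Str.slice name (some 3) none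
      let keys := pvPairPrefixes.flatMap (fun pre =>
        [thing, thing ++ "s", pvRstripS thing].map (fun suf => pre ++ suf))
      let rel := keys.foldl (fun st3 key =>
        if M.contains key && !st3.2.contains key then
          (st3.1.insert key (M.getD key ""), st3.2.add key)
        else st3) (PySem.Dict.mk [], st.2)
      if rel.1.items = [] then (st.1, rel.2)
      else (st.1.insert (thing ++ "_collection") rel.1, rel.2)
    else st) (PySem.Dict.mk [], PySem.Set.ofList [])

def group_standalone_methods_py_alt (methods : List (String × String)) :
    List (String × List (String × String)) :=
  let p1 := pvCollectPairs methods
  -- single classification pass: skip used, elif chain coord → render → prefix groups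
  let tr := methods.foldl (fun (st : PySem.Dict String String × PySem.Dict String String ×
      PySem.Dict String (PySem.Dict String String)) nd =>
    let name := nd.1
    let doc := nd.2
    if p1.2.contains name then st
    else if pvCoordP name then
      (st.1.insert name doc, st.2.1, st.2.2)
    else if pvRenderP name then
      (st.1, st.2.1.insert name doc, st.2.2)
    else
      -- prefix_groups.setdefault(key, {})[name] = doc
      let key := pvVerbKey name
      (st.1, st.2.1, st.2.2.insert key ((st.2.2.getD key (PySem.Dict.mk [])).insert name doc)))
    (PySem.Dict.mk [], PySem.Dict.mk [], PySem.Dict.mk [])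
  let groups2 := if tr.1.items = [] then p1.1 else p1.1.insert "coordinate_transforms" tr.1
  let groups3 := if tr.2.1.items = [] then groups2 else groups2.insert "rendering" tr.2.1
  let groupsF := PySem.Dict.update groups3 tr.2.2.items
  groupsF.items.map (fun kv => (kv.1, kv.2.items))

-- ===== PRECONDITION & SPEC =====
-- Pre_ excludes association lists with duplicate keys: no Python dict gives rise to such a list
-- (dict iteration yields each key at most once), so A never receives one; on such lists A's
-- first-match lookup and B's per-entry values are both accidental readings of a non-dict.
def Pre_group_standalone_methods_py (methods : List (String × String)) : Prop :=
  (methods.map Prod.fst).Nodup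
instance (methods : List (String × String)) : Decidable (Pre_group_standalone_methods_py methods) := by
  unfold Pre_group_standalone_methods_py; infer_instance

def pvWitness_group_standalone_methods_py : (List (String × String)) :=
  [("AddPoint", "a"), ("RemovePoint", "r"), ("WorldToViewX", "c"), ("RenderNow", "d"),
   ("GetX", "g"), ("Update", "u")]

def Spec_group_standalone_methods_py (methods : List (String × String)) (out : List (String × List (String × String))) : Prop := out = group_standalone_methods_py_alt methods
instance (methods : List (String × String)) (out : List (String × List (String × String))) : Decidable (Spec_group_standalone_methods_py methods out) := by unfold Spec_group_standalone_methods_py; infer_instance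

-- ===== CLAIM (what is proved, stated in full; the proofs are below) =====
def Claim_equal_group_standalone_methods_py : Prop := ∀ (methods : List (String × String)), Dom_group_standalone_methods_py methods → Pre_group_standalone_methods_py methods → Spec_group_standalone_methods_py methods (group_standalone_methods_py methods)

-- ===== LEMMAS AND PROOFS =====

-- the common form both ports are reduced to: phase 1, then three independent guarded folds
def pvCanon (methods : List (String × String)) : List (String × List (String × String)) :=
  let u := (pvCollectPairs methods).2
  let coord := methods.foldl (fun d nd =>
    if !u.contains nd.1 && pvCoordP nd.1 then d.insert nd.1 nd.2 else d) (PySem.Dict.mk [])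
  let rend := methods.foldl (fun d nd =>
    if !u.contains nd.1 && !pvCoordP nd.1 && pvRenderP nd.1 then d.insert nd.1 nd.2 else d)
    (PySem.Dict.mk [])
  let pg := methods.foldl (fun d nd =>
    if !u.contains nd.1 && !pvCoordP nd.1 && !pvRenderP nd.1 then pvPgStep d nd else d)
    (PySem.Dict.mk [])
  let g2 := if coord.items = [] then (pvCollectPairs methods).1
            else (pvCollectPairs methods).1.insert "coordinate_transforms" coord
  let g3 := if rend.items = [] then g2 else g2.insert "rendering" rend
  (pg.items.foldl (fun g kv => g.insert kv.1 kv.2) g3).items.map (fun kv => (kv.1, kv.2.items))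

lemma pv_contains_add (u : PySem.Set String) {x y : String} (h : x ≠ y) :
    (u.add y).contains x = u.contains x := by
  apply Bool.coe_iff_coe.mp
  rw [PySem.Set.contains_iff, PySem.Set.contains_iff, PySem.Set.mem_add]
  exact ⟨fun hh => hh.resolve_right h, Or.inl⟩

-- phase 1: A's nested prefix/suffix loops = B's loop over the flattened key list
lemma pv_phase1_eq (methods : List (String × String)) :
    pvA_phase1 methods = pvCollectPairs methods := by
  unfold pvA_phase1 pvCollectPairs
  apply PySem.List.foldl_congr_mem
  intro st nd _
  dsimp only
  by_cases hadd : (PySem.Str.startswith nd.1 "Add" && decide (PySem.Str.len nd.1 > 3)) = true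
  · rw [if_pos hadd, if_pos hadd]
    have hrel :
        (pvPairPrefixes.flatMap (fun pre =>
          [PySem.Str.slice nd.1 (some 3) none, PySem.Str.slice nd.1 (some 3) none ++ "s",
           pvRstripS (PySem.Str.slice nd.1 (some 3) none)].map (fun suf => pre ++ suf))).foldl
          (fun st3 key =>
            if (PySem.Dict.mk methods).contains key && !st3.2.contains key then
              (st3.1.insert key ((PySem.Dict.mk methods).getD key ""), st3.2.add key)
            else st3) (PySem.Dict.mk [], st.2)
        = pvPairPrefixes.foldl (fun st2 pre =>
            [PySem.Str.slice nd.1 (some 3) none, PySem.Str.slice nd.1 (some 3) none ++ "s",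
             pvRstripS (PySem.Str.slice nd.1 (some 3) none)].foldl (fun st3 suf =>
              pvA_pairStep (PySem.Dict.mk methods) st3 (pre ++ suf)) st2)
            (PySem.Dict.mk [], st.2) := by
      rw [List.foldl_flatMap]
      simp only [List.foldl_map, pvA_pairStep]
    rw [hrel]
  · rw [if_neg hadd, if_neg hadd]

-- a select pass that also marks names used: with distinct names the growing `used` can be
-- replaced by the initial one, and the pass splits into two independent folds
lemma pv_select_split (P : String → Bool) (val : String → String) :
    ∀ (ms : List (String × String)) (c : PySem.Dict String String) (u : PySem.Set String),
      (ms.map Prod.fst).Nodup →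
      ms.foldl (fun st nd =>
          if !st.2.contains nd.1 && P nd.1 then
            (st.1.insert nd.1 (val nd.1), st.2.add nd.1)
          else st) (c, u)
      = (ms.foldl (fun cc nd =>
            if !u.contains nd.1 && P nd.1 then cc.insert nd.1 (val nd.1) else cc) c,
         ms.foldl (fun uu nd =>
            if !u.contains nd.1 && P nd.1 then uu.add nd.1 else uu) u) := by
  intro ms
  induction ms with
  | nil => intro c u _; rfl
  | cons nd ms ih =>
    intro c u h
    rw [List.map_cons, List.nodup_cons] at h
    obtain ⟨hn, ht⟩ := h
    simp only [List.foldl_cons]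
    by_cases hc : (!u.contains nd.1 && P nd.1) = true
    · rw [if_pos hc, if_pos hc, if_pos hc, ih _ _ ht]
      simp only [Prod.mk.injEq]
      constructor
      · apply PySem.List.foldl_congr_mem
        intro acc x hx
        have hne : x.1 ≠ nd.1 := fun e => hn (e ▸ List.mem_map_of_mem hx)
        rw [pv_contains_add u hne]
      · apply PySem.List.foldl_congr_mem
        intro acc x hx
        have hne : x.1 ≠ nd.1 := fun e => hn (e ▸ List.mem_map_of_mem hx)
        rw [pv_contains_add u hne]
    · rw [if_neg hc, if_neg hc, if_neg hc]
      exact ih c u ht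

-- membership after a mark-used fold whose guard reads the fixed initial set
lemma pv_used_contains (P : String → Bool) :
    ∀ (ms : List (String × String)) (u w : PySem.Set String) (x : String),
      ((ms.foldl (fun uu nd =>
          if !u.contains nd.1 && P nd.1 then uu.add nd.1 else uu) w).contains x = true)
      ↔ (w.contains x = true ∨ (x ∈ ms.map Prod.fst ∧ u.contains x = false ∧ P x = true)) := by
  intro ms
  induction ms with
  | nil => intro u w x; simp
  | cons nd ms ih =>
    intro u w x
    simp only [List.foldl_cons, List.map_cons, List.mem_cons]
    by_cases hc : (!u.contains nd.1 && P nd.1) = true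
    · rw [if_pos hc, ih]
      simp only [Bool.and_eq_true, Bool.not_eq_true'] at hc
      by_cases hx : x = nd.1
      · subst hx
        have hmem : (w.add nd.1).contains nd.1 = true := by
          rw [PySem.Set.contains_iff, PySem.Set.mem_add]; exact Or.inr rfl
        constructor
        · intro _; exact Or.inr ⟨Or.inl rfl, hc.1, hc.2⟩
        · intro _; exact Or.inl hmem
      · rw [pv_contains_add w hx]
        constructor
        · rintro (hw | ⟨hm, hrest⟩)
          · exact Or.inl hw
          · exact Or.inr ⟨Or.inr hm, hrest⟩
        · rintro (hw | ⟨hm | hm, hrest⟩)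
          · exact Or.inl hw
          · exact absurd hm hx
          · exact Or.inr ⟨hm, hrest⟩
    · rw [if_neg hc, ih]
      constructor
      · rintro (hw | ⟨hm, hrest⟩)
        · exact Or.inl hw
        · exact Or.inr ⟨Or.inr hm, hrest⟩
      · rintro (hw | ⟨hm | hm, hu, hp⟩)
        · exact Or.inl hw
        · exact absurd (show (!u.contains nd.1 && P nd.1) = true by rw [← hm, hu, hp]; rfl) hc
        · exact Or.inr ⟨hm, hu, hp⟩

-- contains of a mark-used fold, on a name of the list
lemma pv_used2 (P : String → Bool) (ms : List (String × String)) (u : PySem.Set String)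
    (x : String) (hx : x ∈ ms.map Prod.fst) :
    (ms.foldl (fun uu nd =>
        if !u.contains nd.1 && P nd.1 then uu.add nd.1 else uu) u).contains x
    = (u.contains x || P x) := by
  apply Bool.coe_iff_coe.mp
  rw [pv_used_contains]
  cases hu : u.contains x <;> cases hp : P x <;> simp [hx, hu, hp]

-- B's single pass is three independent folds, one per branch of the elif chain
lemma pv_triple_split (u : PySem.Set String) :
    ∀ (ms : List (String × String)) (a b : PySem.Dict String String)
      (c : PySem.Dict String (PySem.Dict String String)),
      ms.foldl (fun st nd =>
        if u.contains nd.1 then st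
        else if pvCoordP nd.1 then
          (st.1.insert nd.1 nd.2, st.2.1, st.2.2)
        else if pvRenderP nd.1 then
          (st.1, st.2.1.insert nd.1 nd.2, st.2.2)
        else
          (st.1, st.2.1, st.2.2.insert (pvVerbKey nd.1)
            ((st.2.2.getD (pvVerbKey nd.1) (PySem.Dict.mk [])).insert nd.1 nd.2)))
        (a, b, c)
      = (ms.foldl (fun d nd =>
            if !u.contains nd.1 && pvCoordP nd.1 then d.insert nd.1 nd.2 else d) a,
         ms.foldl (fun d nd =>
            if !u.contains nd.1 && !pvCoordP nd.1 && pvRenderP nd.1 then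
              d.insert nd.1 nd.2 else d) b,
         ms.foldl (fun d nd =>
            if !u.contains nd.1 && !pvCoordP nd.1 && !pvRenderP nd.1 then
              pvPgStep d nd else d) c) := by
  intro ms
  induction ms with
  | nil => intro a b c; rfl
  | cons nd ms ih =>
    intro a b c
    simp only [List.foldl_cons]
    by_cases h1 : u.contains nd.1 = true
    · rw [if_pos h1,
        if_neg (show ¬((!u.contains nd.1 && pvCoordP nd.1) = true) by rw [h1]; simp),
        if_neg (show ¬((!u.contains nd.1 && !pvCoordP nd.1 && pvRenderP nd.1) = true) by rw [h1]; simp),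
        if_neg (show ¬((!u.contains nd.1 && !pvCoordP nd.1 && !pvRenderP nd.1) = true) by rw [h1]; simp)]
      exact ih a b c
    · have h1' : u.contains nd.1 = false := by simpa using h1
      rw [if_neg h1]
      by_cases h2 : pvCoordP nd.1 = true
      · rw [if_pos h2,
          if_pos (show (!u.contains nd.1 && pvCoordP nd.1) = true by rw [h1', h2]; rfl),
          if_neg (show ¬((!u.contains nd.1 && !pvCoordP nd.1 && pvRenderP nd.1) = true) by rw [h2]; simp),
          if_neg (show ¬((!u.contains nd.1 && !pvCoordP nd.1 && !pvRenderP nd.1) = true) by rw [h2]; simp)]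
        exact ih _ _ _
      · have h2' : pvCoordP nd.1 = false := by simpa using h2
        rw [if_neg h2]
        by_cases h3 : pvRenderP nd.1 = true
        · rw [if_pos h3,
            if_neg (show ¬((!u.contains nd.1 && pvCoordP nd.1) = true) by rw [h2']; simp),
            if_pos (show (!u.contains nd.1 && !pvCoordP nd.1 && pvRenderP nd.1) = true by
              rw [h1', h2', h3]; rfl),
            if_neg (show ¬((!u.contains nd.1 && !pvCoordP nd.1 && !pvRenderP nd.1) = true) by
              rw [h3]; simp)]
          exact ih _ _ _
        · have h3' : pvRenderP nd.1 = false := by simpa using h3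
          rw [if_neg h3,
            if_neg (show ¬((!u.contains nd.1 && pvCoordP nd.1) = true) by rw [h2']; simp),
            if_neg (show ¬((!u.contains nd.1 && !pvCoordP nd.1 && pvRenderP nd.1) = true) by
              rw [h3']; simp),
            if_pos (show (!u.contains nd.1 && !pvCoordP nd.1 && !pvRenderP nd.1) = true by
              rw [h1', h2', h3']; rfl)]
          exact ih _ _ (pvPgStep c nd)

-- a guarded dict-building fold over fresh distinct keys appends exactly the selected pairs
lemma pv_filter_items (pred : String → Bool) :
    ∀ (ms : List (String × String)) (d : PySem.Dict String String),
      (ms.map Prod.fst).Nodup → (∀ nd ∈ ms, d.contains nd.1 = false) →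
      (ms.foldl (fun d nd => if pred nd.1 then d.insert nd.1 nd.2 else d) d).items
      = d.items ++ ms.filter (fun nd => pred nd.1) := by
  intro ms
  induction ms with
  | nil => intro d _ _; simp
  | cons nd ms ih =>
    intro d h hf
    rw [List.map_cons, List.nodup_cons] at h
    obtain ⟨hn, ht⟩ := h
    simp only [List.foldl_cons, List.filter_cons]
    by_cases hp : pred nd.1 = true
    · rw [if_pos hp, if_pos hp]
      rw [ih _ ht ?fresh]
      · rw [PySem.Dict.items_insert_of_not_contains d nd.2 (hf nd List.mem_cons_self)]
        simp [Prod.mk.eta]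
      case fresh =>
        intro m hm
        rw [PySem.Dict.contains_insert]
        have hne : m.1 ≠ nd.1 := fun e => hn (e ▸ List.mem_map_of_mem hm)
        simp [hne, hf m (List.mem_cons_of_mem _ hm)]
    · rw [if_neg hp, if_neg hp]
      exact ih d ht (fun m hm => hf m (List.mem_cons_of_mem _ hm))

-- first-match lookup at an entry of a duplicate-free dict returns that entry's value
lemma pv_getD_entry (methods : List (String × String)) (nd : String × String)
    (h : (methods.map Prod.fst).Nodup) (hm : nd ∈ methods) :
    (PySem.Dict.mk methods).getD nd.1 "" = nd.2 := by
  have hi : (nd.1, nd.2) ∈ (PySem.Dict.mk methods).items := by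
    simpa [Prod.mk.eta] using hm
  have hk : (PySem.Dict.mk methods).keys.Nodup := h
  exact PySem.Dict.getD_of_get?_eq_some _ _ (PySem.Dict.get?_of_mem_items _ hi hk)

lemma pv_a_eq_canon (methods : List (String × String))
    (h : (methods.map Prod.fst).Nodup) :
    group_standalone_methods_py methods = pvCanon methods := by
  have hc : pvA_coord methods (pvCollectPairs methods).2
      = (methods.foldl (fun d nd =>
          if !(pvCollectPairs methods).2.contains nd.1 && pvCoordP nd.1 then
            d.insert nd.1 nd.2 else d) (PySem.Dict.mk []),
         methods.foldl (fun uu nd =>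
          if !(pvCollectPairs methods).2.contains nd.1 && pvCoordP nd.1 then
            uu.add nd.1 else uu) (pvCollectPairs methods).2) := by
    refine Eq.trans (pv_select_split pvCoordP
      (fun n => (PySem.Dict.mk methods).getD n "") methods (PySem.Dict.mk [])
      (pvCollectPairs methods).2 h) ?_
    simp only [Prod.mk.injEq]
    refine ⟨?_, trivial⟩
    apply PySem.List.foldl_congr_mem
    intro acc x hx
    dsimp only
    rw [pv_getD_entry methods x h hx]
  have hc1 : (pvA_coord methods (pvCollectPairs methods).2).1
      = methods.foldl (fun d nd =>
          if !(pvCollectPairs methods).2.contains nd.1 && pvCoordP nd.1 then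
            d.insert nd.1 nd.2 else d) (PySem.Dict.mk []) := by rw [hc]
  have hc2 : (pvA_coord methods (pvCollectPairs methods).2).2
      = methods.foldl (fun uu nd =>
          if !(pvCollectPairs methods).2.contains nd.1 && pvCoordP nd.1 then
            uu.add nd.1 else uu) (pvCollectPairs methods).2 := by rw [hc]
  -- abbreviate the used-set after the coordinate pass
  have hu2mem : ∀ x ∈ methods,
      (methods.foldl (fun uu nd =>
        if !(pvCollectPairs methods).2.contains nd.1 && pvCoordP nd.1 then
          uu.add nd.1 else uu) (pvCollectPairs methods).2).contains x.1
      = ((pvCollectPairs methods).2.contains x.1 || pvCoordP x.1) :=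
    fun x hx => pv_used2 pvCoordP methods _ x.1 (List.mem_map_of_mem hx)
  have hr : pvA_render methods (methods.foldl (fun uu nd =>
        if !(pvCollectPairs methods).2.contains nd.1 && pvCoordP nd.1 then
          uu.add nd.1 else uu) (pvCollectPairs methods).2)
      = (methods.foldl (fun d nd =>
          if !(pvCollectPairs methods).2.contains nd.1 && !pvCoordP nd.1 && pvRenderP nd.1 then
            d.insert nd.1 nd.2 else d) (PySem.Dict.mk []),
         methods.foldl (fun uu nd =>
          if !(methods.foldl (fun uu nd =>
                if !(pvCollectPairs methods).2.contains nd.1 && pvCoordP nd.1 then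
                  uu.add nd.1 else uu) (pvCollectPairs methods).2).contains nd.1
             && pvRenderP nd.1 then uu.add nd.1 else uu)
          (methods.foldl (fun uu nd =>
            if !(pvCollectPairs methods).2.contains nd.1 && pvCoordP nd.1 then
              uu.add nd.1 else uu) (pvCollectPairs methods).2)) := by
    refine Eq.trans (pv_select_split pvRenderP
      (fun n => (PySem.Dict.mk methods).getD n "") methods (PySem.Dict.mk []) _ h) ?_
    simp only [Prod.mk.injEq]
    refine ⟨?_, trivial⟩
    apply PySem.List.foldl_congr_mem
    intro acc x hx
    dsimp only
    rw [pv_getD_entry methods x h hx, hu2mem x hx, Bool.not_or]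
  have hr1 := congrArg Prod.fst hr
  have hr2 := congrArg Prod.snd hr
  dsimp only at hr1 hr2
  -- the remaining/prefix-group chain
  have hu3mem : ∀ x ∈ methods,
      (methods.foldl (fun uu nd =>
        if !(methods.foldl (fun uu nd =>
              if !(pvCollectPairs methods).2.contains nd.1 && pvCoordP nd.1 then
                uu.add nd.1 else uu) (pvCollectPairs methods).2).contains nd.1
           && pvRenderP nd.1 then uu.add nd.1 else uu)
        (methods.foldl (fun uu nd =>
          if !(pvCollectPairs methods).2.contains nd.1 && pvCoordP nd.1 then
            uu.add nd.1 else uu) (pvCollectPairs methods).2)).contains x.1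
      = (((pvCollectPairs methods).2.contains x.1 || pvCoordP x.1) || pvRenderP x.1) := by
    intro x hx
    rw [pv_used2 pvRenderP methods _ x.1 (List.mem_map_of_mem hx), hu2mem x hx]
  have hrem : (methods.foldl (fun d nd =>
        if !(methods.foldl (fun uu nd =>
              if !(methods.foldl (fun uu nd =>
                    if !(pvCollectPairs methods).2.contains nd.1 && pvCoordP nd.1 then
                      uu.add nd.1 else uu) (pvCollectPairs methods).2).contains nd.1
                 && pvRenderP nd.1 then uu.add nd.1 else uu)
              (methods.foldl (fun uu nd =>
                if !(pvCollectPairs methods).2.contains nd.1 && pvCoordP nd.1 then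
                  uu.add nd.1 else uu) (pvCollectPairs methods).2)).contains nd.1 then
          d.insert nd.1 nd.2 else d) (PySem.Dict.mk [])).items
      = methods.filter (fun nd =>
          !(methods.foldl (fun uu nd =>
              if !(methods.foldl (fun uu nd =>
                    if !(pvCollectPairs methods).2.contains nd.1 && pvCoordP nd.1 then
                      uu.add nd.1 else uu) (pvCollectPairs methods).2).contains nd.1
                 && pvRenderP nd.1 then uu.add nd.1 else uu)
            (methods.foldl (fun uu nd =>
              if !(pvCollectPairs methods).2.contains nd.1 && pvCoordP nd.1 then
                uu.add nd.1 else uu) (pvCollectPairs methods).2)).contains nd.1) := by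
    have := pv_filter_items (fun n =>
      !(methods.foldl (fun uu nd =>
          if !(methods.foldl (fun uu nd =>
                if !(pvCollectPairs methods).2.contains nd.1 && pvCoordP nd.1 then
                  uu.add nd.1 else uu) (pvCollectPairs methods).2).contains nd.1
             && pvRenderP nd.1 then uu.add nd.1 else uu)
        (methods.foldl (fun uu nd =>
          if !(pvCollectPairs methods).2.contains nd.1 && pvCoordP nd.1 then
            uu.add nd.1 else uu) (pvCollectPairs methods).2)).contains n)
      methods (PySem.Dict.mk []) h (fun nd _ => rfl)
    simpa using this
  have hpg : (methods.foldl (fun d nd =>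
        if !(methods.foldl (fun uu nd =>
              if !(methods.foldl (fun uu nd =>
                    if !(pvCollectPairs methods).2.contains nd.1 && pvCoordP nd.1 then
                      uu.add nd.1 else uu) (pvCollectPairs methods).2).contains nd.1
                 && pvRenderP nd.1 then uu.add nd.1 else uu)
              (methods.foldl (fun uu nd =>
                if !(pvCollectPairs methods).2.contains nd.1 && pvCoordP nd.1 then
                  uu.add nd.1 else uu) (pvCollectPairs methods).2)).contains nd.1 then
          d.insert nd.1 nd.2 else d) (PySem.Dict.mk [])).items.foldl pvPgStep (PySem.Dict.mk [])
      = methods.foldl (fun d nd =>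
          if !(pvCollectPairs methods).2.contains nd.1 && !pvCoordP nd.1 && !pvRenderP nd.1 then
            pvPgStep d nd else d) (PySem.Dict.mk []) := by
    rw [hrem, List.foldl_filter]
    apply PySem.List.foldl_congr_mem
    intro acc x hx
    dsimp only
    rw [hu3mem x hx, Bool.not_or, Bool.not_or]
  simp only [group_standalone_methods_py, pvCanon]
  rw [pv_phase1_eq, hc1, hc2, hr1, hr2, hpg]
lemma pv_alt_eq_canon (methods : List (String × String)) :
    group_standalone_methods_py_alt methods = pvCanon methods := by
  simp only [group_standalone_methods_py_alt, pvCanon]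
  rw [pv_triple_split]
  rfl

theorem pv_main (methods : List (String × String))
    (h : (methods.map Prod.fst).Nodup) :
    group_standalone_methods_py methods = group_standalone_methods_py_alt methods :=
  (pv_a_eq_canon methods h).trans (pv_alt_eq_canon methods).symm

-- ===== VERDICT (by name: the statement is the Claim_ definition above) =====
theorem group_standalone_methods_py_spec : Claim_equal_group_standalone_methods_py := by
  intro methods _ hpre
  unfold Spec_group_standalone_methods_py
  exact pv_main methods hpre
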